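-- pv_equiv track=rewrite | github.com/jackinf/aoc | 2022/day08/main.py | calculate_maxes
-- ===== SOURCE A (Python) =====
-- def calculate_maxes(grid):
--     leftmax = [row[:] for row in grid[:]]
--     rightmax = [row[:] for row in grid[:]]
--     topmax = [row[:] for row in grid[:]]
--     bottommax = [row[:] for row in grid[:]]
--
--     for row in range(len(leftmax)):
--         for col in range(1, len(leftmax[0])):
--             leftmax[row][col] = max(leftmax[row][col], leftmax[row][col - 1])
--
--     for row in range(len(rightmax)):
--         for col in range(len(rightmax[0]) - 2, -1, -1):
--             rightmax[row][col] = max(rightmax[row][col], rightmax[row][col + 1])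
--
--     for col in range(len(topmax)):
--         for row in range(1, len(topmax)):
--             topmax[row][col] = max(topmax[row][col], topmax[row - 1][col])
--
--     for col in range(len(bottommax)):
--         for row in range(len(bottommax) - 2, -1, -1):
--             bottommax[row][col] = max(bottommax[row][col], bottommax[row + 1][col])
--
--     return leftmax, rightmax, topmax, bottommax
-- ===== SOURCE B (Python) =====
-- def calculate_maxes(grid):
--     # Brute force by definition: each output cell is the max of the slice of
--     # entries visible in that direction (no recurrence, no in-place updates).
--     left = [[max(row[:c + 1]) for c in range(len(row))] for row in grid]
--     right = [[max(row[c:]) for c in range(len(row))] for row in grid]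
--     top = [[max(g[c] for g in grid[:r + 1]) for c in range(len(grid[r]))]
--            for r in range(len(grid))]
--     bottom = [[max(g[c] for g in grid[r:]) for c in range(len(grid[r]))]
--               for r in range(len(grid))]
--     return left, right, top, bottom
-- ===== Notes on version B (the rewrite author's own statement) =====
-- stated objective: simpler
-- what changed: A's four stateful in-place prefix-maximum sweeps (a running-max recurrence updating the grid cell by cell) are replaced by a direct per-cell definition: each output cell is max() of the row/column slice visible in that direction, built as four comprehensions with no recurrence and no mutation.
-- intended difference: On rectangular grids with at least 2 rows and more columns than rows whose extra columns (index >= row count) are not constant, A's top/bottom passes loop the column index over range(len(grid)) and so return the raw grid entries in those columns, while B returns the true directional column maxima there, which is the intended value. — e.g. on calculate_maxes([[0, 1, 5], [2, 3, 4]]): A returns ([[0, 1, 5], [2, 3, 4]], [[5, 5, 5], [4, 4, 4]], [[0, 1, 5], [2, 3, 4]], [[2, 3, 5], [2, 3, 4]]), B returns ([[0, 1, 5], [2, 3, 4]], [[5, 5, 5], [4, 4, 4]], [[0, 1, 5], [2, 3, 5]], [[2, 3, 5], [2, 3, 4]])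
import Mathlib
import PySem

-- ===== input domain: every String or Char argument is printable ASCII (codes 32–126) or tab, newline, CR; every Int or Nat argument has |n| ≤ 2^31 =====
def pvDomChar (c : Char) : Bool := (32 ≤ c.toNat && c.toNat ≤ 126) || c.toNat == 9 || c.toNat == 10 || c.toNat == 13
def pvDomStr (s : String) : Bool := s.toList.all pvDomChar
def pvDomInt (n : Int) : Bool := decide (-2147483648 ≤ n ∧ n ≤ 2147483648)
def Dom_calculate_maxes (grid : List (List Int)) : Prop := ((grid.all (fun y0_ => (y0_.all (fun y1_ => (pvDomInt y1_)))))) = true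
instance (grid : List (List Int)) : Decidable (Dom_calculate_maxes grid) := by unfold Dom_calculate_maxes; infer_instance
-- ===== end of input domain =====

-- B replaces A's four stateful in-place running-maximum sweeps by a direct per-cell
-- definition (each output cell = max of the slice visible in that direction); objective:
-- simpler. Equivalence is claimed on Pre_ outside D_ (see the sentences above each).

-- ===== PORT A =====
def pvGet2 (g : List (List Int)) (r c : Nat) : Int := (g.getD r []).getD c 0

def pvSet2 (g : List (List Int)) (r c : Nat) (v : Int) : List (List Int) :=
  g.set r ((g.getD r []).set c v)

def pvStepT (col : Nat) (g : List (List Int)) (row : Nat) : List (List Int) :=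
  pvSet2 g row col (max (pvGet2 g row col) (pvGet2 g (row - 1) col))

def pvStepB (col : Nat) (g : List (List Int)) (row : Nat) : List (List Int) :=
  pvSet2 g row col (max (pvGet2 g row col) (pvGet2 g (row + 1) col))

-- Transliteration notes: len(xmax[0]) / len(xmax) are constant during the loops (List.set
-- preserves lengths), hoisted as ncols / n; range(1,k) = range' 1 (k-1);
-- range(k-2,-1,-1) = (range (k-1)).reverse; on inputs where Python does not raise every
-- index is in range, so List.set / getD are exact there.
def calculate_maxes (grid : List (List Int)) : List (List Int) × List (List Int) × List (List Int) × List (List Int) :=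
  let n := grid.length
  let ncols := (grid.headD []).length
  let leftmax := (List.range n).foldl (fun g row =>
    (List.range' 1 (ncols - 1)).foldl (fun g col =>
      pvSet2 g row col (max (pvGet2 g row col) (pvGet2 g row (col - 1)))) g) grid
  let rightmax := (List.range n).foldl (fun g row =>
    ((List.range (ncols - 1)).reverse).foldl (fun g col =>
      pvSet2 g row col (max (pvGet2 g row col) (pvGet2 g row (col + 1)))) g) grid
  let topmax := (List.range n).foldl (fun g col =>
    (List.range' 1 (n - 1)).foldl (pvStepT col) g) grid
  let bottommax := (List.range n).foldl (fun g col =>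
    ((List.range (n - 1)).reverse).foldl (pvStepB col) g) grid
  (leftmax, rightmax, topmax, bottommax)

-- ===== PORT B =====
-- Python max() of a nonempty list (Source B only applies it to nonempty slices on Pre_)
def pvMax : List Int → Int
  | [] => 0
  | x :: t => t.foldl max x

-- Source B's comprehensions: row[:c+1] = take (c+1), row[c:] = drop c, grid[:r+1] = take (r+1),
-- grid[r:] = drop r; g[c] is in range on Pre_'s rectangular grids, ported as getD c 0.
def calculate_maxes_alt (grid : List (List Int)) : List (List Int) × List (List Int) × List (List Int) × List (List Int) :=
  (grid.map (fun row => (List.range row.length).map (fun c => pvMax (row.take (c + 1)))),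
   grid.map (fun row => (List.range row.length).map (fun c => pvMax (row.drop c))),
   (List.range grid.length).map (fun r =>
     (List.range (grid.getD r []).length).map (fun c =>
       pvMax ((grid.take (r + 1)).map (fun g => g.getD c 0)))),
   (List.range grid.length).map (fun r =>
     (List.range (grid.getD r []).length).map (fun c =>
       pvMax ((grid.drop r).map (fun g => g.getD c 0)))))

-- ===== PRECONDITION & SPEC =====
-- Pre_ excludes (a) non-rectangular grids: A raises IndexError when a later row is shorter
-- than the first, and on ragged grids with longer later rows it processes each row only up
-- to the first row's length — an artefact of keying every loop to row 0 that B (which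
-- raises IndexError there) cannot reproduce; and (b) rectangular grids with at least 2 rows
-- and fewer columns than rows, on which A's top/bottom passes raise IndexError.
def Pre_calculate_maxes (grid : List (List Int)) : Prop :=
  (∀ row ∈ grid, row.length = (grid.headD []).length) ∧
  (grid.length ≤ (grid.headD []).length ∨ grid.length = 1)

instance (grid : List (List Int)) : Decidable (Pre_calculate_maxes grid) := by
  unfold Pre_calculate_maxes; infer_instance

def pvWitness_calculate_maxes : List (List Int) := [[1, 2], [4, 3]]

-- On rectangular grids with ≥ 2 rows and more columns than rows whose extra columns
-- (index ≥ row count) are not constant, A's top/bottom passes loop the column index over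
-- range(len(grid)) and return the raw grid entries in those columns, while B returns the
-- true directional column maxima there, which is the intended value.
def D_calculate_maxes (grid : List (List Int)) : Prop :=
  ∃ c < (grid.headD []).length, grid.length ≤ c ∧
    ∃ r1 < grid.length, ∃ r2 < grid.length,
      (grid.getD r1 []).getD c 0 ≠ (grid.getD r2 []).getD c 0

instance (grid : List (List Int)) : Decidable (D_calculate_maxes grid) := by
  unfold D_calculate_maxes; infer_instance

def Spec_calculate_maxes (grid : List (List Int)) (out : List (List Int) × List (List Int) × List (List Int) × List (List Int)) : Prop := ¬ D_calculate_maxes grid → out = calculate_maxes_alt grid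
instance (grid : List (List Int)) (out : List (List Int) × List (List Int) × List (List Int) × List (List Int)) : Decidable (Spec_calculate_maxes grid out) := by unfold Spec_calculate_maxes; infer_instance

def pvDiffWitness_calculate_maxes : List (List Int) := [[0, 1, 5], [2, 3, 4]]

def pvDiffWitnessOut_calculate_maxes : (List (List Int) × List (List Int) × List (List Int) × List (List Int)) × (List (List Int) × List (List Int) × List (List Int) × List (List Int)) :=
  (([[0, 1, 5], [2, 3, 4]], [[5, 5, 5], [4, 4, 4]], [[0, 1, 5], [2, 3, 4]], [[2, 3, 5], [2, 3, 4]]),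
   ([[0, 1, 5], [2, 3, 4]], [[5, 5, 5], [4, 4, 4]], [[0, 1, 5], [2, 3, 5]], [[2, 3, 5], [2, 3, 4]]))

-- ===== CLAIM (what is proved, stated in full; the proofs are below) =====
def Claim_unchanged_calculate_maxes : Prop := ∀ (grid : List (List Int)), Dom_calculate_maxes grid → Pre_calculate_maxes grid → Spec_calculate_maxes grid (calculate_maxes grid)

def Claim_changed_calculate_maxes : Prop := Dom_calculate_maxes (pvDiffWitness_calculate_maxes) ∧ Pre_calculate_maxes (pvDiffWitness_calculate_maxes) ∧ D_calculate_maxes (pvDiffWitness_calculate_maxes) ∧ calculate_maxes (pvDiffWitness_calculate_maxes) = pvDiffWitnessOut_calculate_maxes.1 ∧ calculate_maxes_alt (pvDiffWitness_calculate_maxes) = pvDiffWitnessOut_calculate_maxes.2 ∧ pvDiffWitnessOut_calculate_maxes.1 ≠ pvDiffWitnessOut_calculate_maxes.2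

def Claim_exact_calculate_maxes : Prop := ∀ (grid : List (List Int)), Dom_calculate_maxes grid → Pre_calculate_maxes grid → D_calculate_maxes grid → calculate_maxes grid ≠ calculate_maxes_alt grid

-- ===== LEMMAS AND PROOFS =====

-- getD helpers

theorem pvGetD_set_ne (l : List Int) (i j : Nat) (a : Int) (h : i ≠ j) :
    (l.set i a).getD j 0 = l.getD j 0 := by
  simp [List.getD_eq_getElem?_getD, List.getElem?_set_ne h]

theorem pvGetD_set_self (l : List Int) (i : Nat) (a : Int) (h : i < l.length) :
    (l.set i a).getD i 0 = a := by
  simp [List.getD_eq_getElem?_getD, h]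

theorem pvGetD_drop (l : List Int) (i j : Nat) :
    (l.drop i).getD j 0 = l.getD (i + j) 0 := by
  simp [List.getD_eq_getElem?_getD, List.getElem?_drop]

theorem pvGetD_eq_getElem (l : List Int) (i : Nat) (h : i < l.length) :
    l.getD i 0 = l[i] := List.getD_eq_getElem l 0 h

-- prefix maximum: pmax l k = max of l[0..k] (k < l.length)

def pmax : List Int → Nat → Int
  | [], _ => 0
  | x :: _, 0 => x
  | x :: t, k+1 => max x (pmax t k)

theorem pmax_succ (l : List Int) (k : Nat) (h : k + 1 < l.length) :
    pmax l (k+1) = max (pmax l k) (l.getD (k+1) 0) := by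
  induction l generalizing k with
  | nil => simp at h
  | cons x t ih =>
    cases k with
    | zero =>
      cases t with
      | nil => simp at h
      | cons y s => simp [pmax]
    | succ k =>
      simp only [pmax]
      rw [ih k (by simpa using h)]
      simp [max_assoc]

theorem pmax_is_max (l : List Int) (k : Nat) (h : k < l.length) :
    pmax l k ∈ l.take (k+1) ∧ ∀ x ∈ l.take (k+1), x ≤ pmax l k := by
  induction l generalizing k with
  | nil => simp at h
  | cons a t ih =>
    cases k with
    | zero => simp [pmax]
    | succ k =>
      obtain ⟨h1, h2⟩ := ih k (by simpa using h)
      constructor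
      · simp only [pmax, List.take_succ_cons, List.mem_cons]
        rcases le_total a (pmax t k) with hle | hle
        · right; rw [max_eq_right hle]; exact h1
        · left; rw [max_eq_left hle]
      · intro x hx
        simp only [List.take_succ_cons, List.mem_cons] at hx
        rcases hx with rfl | hx
        · exact le_max_left _ _
        · exact le_trans (h2 x hx) (le_max_right _ _)

theorem pmax_congr (l l' : List Int) (k : Nat) (hk : k < l.length) (hk' : k < l'.length)
    (h : ∀ j ≤ k, l.getD j 0 = l'.getD j 0) : pmax l k = pmax l' k := by
  induction l generalizing l' k with
  | nil => simp at hk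
  | cons a t ih =>
    cases l' with
    | nil => simp at hk'
    | cons b s =>
      cases k with
      | zero => simpa [pmax] using h 0 le_rfl
      | succ k =>
        simp only [pmax]
        rw [ih s k (by simpa using hk) (by simpa using hk')
            (fun j hj => by simpa using h (j+1) (by omega)),
          show a = b by simpa using h 0 (by omega)]

theorem pmax_zero (l : List Int) (h : 0 < l.length) : pmax l 0 = l.getD 0 0 := by
  cases l with
  | nil => simp at h
  | cons x t => rfl

-- a membership fact used to bound pmax from below
theorem pvGetD_mem_take (l : List Int) (i k : Nat) (hik : i ≤ k) (hk : k < l.length) :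
    l.getD i 0 ∈ l.take (k+1) := by
  have hi : i < (l.take (k+1)).length := by simp; omega
  have : (l.take (k+1))[i] = l[i]'(by omega) := List.getElem_take
  rw [pvGetD_eq_getElem l i (by omega), ← this]
  exact List.getElem_mem hi

theorem pmax_const (l : List Int) (k : Nat) (v : Int) (hk : k < l.length)
    (h : ∀ i < l.length, l.getD i 0 = v) : pmax l k = v := by
  obtain ⟨hm, _⟩ := pmax_is_max l k hk
  obtain ⟨i, hi, heq⟩ := List.getElem_of_mem hm
  have hil : i < l.length := by simp at hi; omega
  rw [← heq, List.getElem_take, ← pvGetD_eq_getElem l i hil, h i hil]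

-- pvMax (Python max) vs pmax

theorem foldl_max_shift (t : List Int) : ∀ a b : Int, t.foldl max (max a b) = max a (t.foldl max b) := by
  induction t with
  | nil => intro a b; rfl
  | cons c t ih =>
    intro a b
    simp only [List.foldl_cons]
    rw [max_assoc, ih]

theorem pvMax_eq_pmax (l : List Int) (h : l ≠ []) : pvMax l = pmax l (l.length - 1) := by
  induction l with
  | nil => exact absurd rfl h
  | cons x t ih =>
    cases t with
    | nil => rfl
    | cons y s =>
      have h1 : pvMax (x :: y :: s) = max x (pvMax (y :: s)) := by
        simp only [pvMax, List.foldl_cons]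
        exact foldl_max_shift s x y
      rw [h1, ih (by simp)]
      simp [pmax]

theorem pmax_take (l : List Int) (m k : Nat) (hkm : k < m) (hk : k < l.length) :
    pmax (l.take m) k = pmax l k := by
  apply pmax_congr _ _ _ (by simp; omega) hk
  intro j hj
  simp [List.getD_eq_getElem?_getD, List.getElem?_take_of_lt (show j < m by omega)]

theorem pvMax_take (l : List Int) (c : Nat) (h : c < l.length) :
    pvMax (l.take (c+1)) = pmax l c := by
  have hlen : (l.take (c+1)).length = c + 1 := by simp; omega
  rw [pvMax_eq_pmax _ (by intro he; rw [he] at hlen; simp at hlen), hlen, Nat.add_sub_cancel,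
    pmax_take l (c+1) c (by omega) h]

theorem pvMax_drop (l : List Int) (c : Nat) (h : c < l.length) :
    pvMax (l.drop c) = pmax (l.drop c) (l.length - 1 - c) := by
  have hlen : (l.drop c).length = l.length - c := by simp
  rw [pvMax_eq_pmax _ (by intro he; rw [he] at hlen; simp at hlen; omega), hlen,
    show l.length - c - 1 = l.length - 1 - c by omega]

theorem pvGetD_map_range {α : Type} (f : Nat → α) (n c : Nat) (d : α) (h : c < n) :
    ((List.range n).map f).getD c d = f c := by
  rw [List.getD_eq_getElem _ _ (by simp [h])]
  simp

-- rows as values of a column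
def colOf (g : List (List Int)) (c : Nat) : List Int := g.map (fun row => row.getD c 0)

theorem colOf_getD (g : List (List Int)) (c r : Nat) (h : r < g.length) :
    (colOf g c).getD r 0 = (g.getD r []).getD c 0 := by
  have h' : g[r]? = some (g[r]'h) := List.getElem?_eq_getElem h
  simp [colOf, List.getD_eq_getElem?_getD, h']

theorem pvGridGetD_set_self (g : List (List Int)) (r : Nat) (ys : List Int) (h : r < g.length) :
    (g.set r ys).getD r [] = ys := by
  simp [List.getD_eq_getElem?_getD, h]

theorem pvGridGetD_set_ne (g : List (List Int)) (r r' : Nat) (ys : List Int) (h : r ≠ r') :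
    (g.set r ys).getD r' [] = g.getD r' [] := by
  simp [List.getD_eq_getElem?_getD, List.getElem?_set_ne h]

theorem pmax_set_drop (l : List Int) (m r : Nat) (hr : r ≤ m) (hm : m + 1 < l.length) :
    pmax ((l.set m (max (l.getD m 0) (l.getD (m+1) 0))).drop r) (m - r) =
      pmax (l.drop r) (m + 1 - r) := by
  set v := max (l.getD m 0) (l.getD (m+1) 0) with hv
  have hlen : (l.set m v).length = l.length := by simp
  rcases Nat.eq_or_lt_of_le hr with rfl | hlt
  · rw [Nat.sub_self, pmax_zero _ (by simp; omega), pvGetD_drop, Nat.add_zero,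
      pvGetD_set_self _ _ _ (by omega)]
    rw [show r + 1 - r = 1 by omega, pmax_succ _ 0 (by simp; omega), pmax_zero _ (by simp; omega),
      pvGetD_drop, pvGetD_drop]
    rw [show r + 0 = r by omega, show r + 1 = r + 1 from rfl]
  · obtain ⟨d, hd⟩ : ∃ d, m - r = d + 1 := ⟨m - r - 1, by omega⟩
    rw [hd, pmax_succ _ d (by simp; omega), pvGetD_drop]
    rw [show r + (d + 1) = m by omega, pvGetD_set_self _ _ _ (by omega)]
    have hcongr : pmax ((l.set m v).drop r) d = pmax (l.drop r) d := by
      apply pmax_congr _ _ _ (by simp; omega) (by simp; omega)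
      intro j hj
      rw [pvGetD_drop, pvGetD_drop, pvGetD_set_ne _ _ _ _ (by omega)]
    rw [hcongr, ← max_assoc]
    rw [show max (pmax (l.drop r) d) (l.getD m 0) = pmax (l.drop r) (d+1) by
      rw [pmax_succ _ d (by simp; omega), pvGetD_drop, show r + (d+1) = m by omega]]
    rw [show m + 1 - r = d + 2 by omega, pmax_succ _ (d+1) (by simp; omega), pvGetD_drop,
      show r + (d + 1 + 1) = m + 1 by omega]

def pvStepL (ys : List Int) (col : Nat) : List Int :=
  ys.set col (max (ys.getD col 0) (ys.getD (col - 1) 0))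

def pvStepR (ys : List Int) (col : Nat) : List Int :=
  ys.set col (max (ys.getD col 0) (ys.getD (col + 1) 0))

theorem leftRow_inv (xs : List Int) :
    ∀ m, m + 1 ≤ xs.length →
      ((List.range' 1 m).foldl pvStepL xs).length = xs.length ∧
      ∀ i, i < xs.length → ((List.range' 1 m).foldl pvStepL xs).getD i 0 =
          if i ≤ m then pmax xs i else xs.getD i 0 := by
  intro m
  induction m with
  | zero =>
    intro h
    refine ⟨rfl, ?_⟩
    intro i hi
    simp only [List.range'_zero, List.foldl_nil]
    rcases Nat.eq_zero_or_pos i with rfl | hpos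
    · simp [pmax_zero xs (by omega)]
    · simp [Nat.not_le.mpr hpos]
  | succ m ih =>
    intro h
    obtain ⟨ihl, ihe⟩ := ih (by omega)
    rw [List.range'_1_concat, List.foldl_append, List.foldl_cons, List.foldl_nil]
    set Y := (List.range' 1 m).foldl pvStepL xs with hY
    refine ⟨by simp [pvStepL, ihl], ?_⟩
    intro i hi
    have hY1m : Y.getD (1 + m) 0 = xs.getD (1 + m) 0 := by
      rw [ihe (1 + m) (by omega), if_neg (by omega)]
    have hYm : Y.getD m 0 = pmax xs m := by rw [ihe m (by omega)]; simp
    by_cases hcase : i = 1 + m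
    · subst hcase
      rw [pvStepL, show 1 + m - 1 = m by omega, pvGetD_set_self _ _ _ (by omega), hY1m, hYm]
      rw [if_pos (by omega), show 1 + m = m + 1 by omega,
        pmax_succ _ m (by omega), max_comm]
    · rw [pvStepL, pvGetD_set_ne _ _ _ _ (Ne.symm hcase), ihe i hi]
      by_cases hle : i ≤ m
      · rw [if_pos hle, if_pos (by omega)]
      · rw [if_neg hle, if_neg (by omega)]

theorem rightRow_inv :
    ∀ (m : Nat) (xs : List Int), m + 1 ≤ xs.length →
      (((List.range m).reverse).foldl pvStepR xs).length = xs.length ∧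
      ∀ i, i < xs.length → (((List.range m).reverse).foldl pvStepR xs).getD i 0 =
          if i ≤ m then pmax (xs.drop i) (m - i) else xs.getD i 0 := by
  intro m
  induction m with
  | zero =>
    intro xs h
    refine ⟨rfl, ?_⟩
    intro i hi
    simp only [List.range_zero, List.reverse_nil, List.foldl_nil]
    rcases Nat.eq_zero_or_pos i with rfl | hpos
    · simp [pmax_zero _ (by simpa using h)]
    · simp [Nat.not_le.mpr hpos]
  | succ m ih =>
    intro xs h
    rw [List.range_succ, List.reverse_append]
    simp only [List.reverse_cons, List.reverse_nil, List.nil_append, List.cons_append,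
      List.foldl_cons]
    set ys := pvStepR xs m with hys
    have hyslen : ys.length = xs.length := by rw [hys, pvStepR]; simp
    obtain ⟨ihl, ihe⟩ := ih ys (by omega)
    refine ⟨by omega, ?_⟩
    intro i hi
    rw [ihe i (by omega)]
    by_cases hle : i ≤ m
    · rw [if_pos hle, if_pos (by omega), hys, pvStepR]
      exact pmax_set_drop xs m i hle (by omega)
    · rw [if_neg hle, hys, pvStepR, pvGetD_set_ne _ _ _ _ (by omega)]
      by_cases he : i = m + 1
      · subst he
        rw [if_pos (by omega), show m + 1 - (m+1) = 0 by omega,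
          pmax_zero _ (by simp; omega), pvGetD_drop, Nat.add_zero]
      · rw [if_neg (by omega)]

theorem fold_row_local (L : List Nat) (g : List (List Int)) (r : Nat)
    (f : List Int → Nat → List Int) (hr : r < g.length) :
    L.foldl (fun g col => g.set r (f (g.getD r []) col)) g = g.set r (L.foldl f (g.getD r [])) := by
  induction L generalizing g with
  | nil =>
    simp only [List.foldl_nil]
    rw [List.getD_eq_getElem g [] hr, List.set_getElem_self]
  | cons a L ih =>
    simp only [List.foldl_cons]
    rw [ih _ (by simpa using hr), pvGridGetD_set_self _ _ _ hr, List.set_set]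

theorem foldl_rows_map (B : List (List Int) → Nat → List (List Int)) (f : List Int → List Int)
    (hB : ∀ g r, r < g.length → B g r = g.set r (f (g.getD r []))) (g : List (List Int)) :
    (List.range g.length).foldl B g = g.map f := by
  have aux : ∀ k, k ≤ g.length →
      (List.range k).foldl B g = (g.take k).map f ++ g.drop k := by
    intro k
    induction k with
    | zero => intro _; simp
    | succ k ih =>
      intro hk
      have hklt : k < g.length := by omega
      rw [List.range_succ, List.foldl_append, List.foldl_cons, List.foldl_nil, ih (by omega)]
      set M := (g.take k).map f ++ g.drop k with hM
      have hpre : ((g.take k).map f).length = k := by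
        rw [List.length_map, List.length_take, Nat.min_eq_left (by omega)]
      have hMlen : M.length = g.length := by
        rw [hM, List.length_append, hpre, List.length_drop]; omega
      have hMk : M.getD k [] = g[k] := by
        rw [hM, List.getD_eq_getElem _ _ (by rw [List.length_append, hpre, List.length_drop]; omega)]
        rw [List.getElem_append_right (by rw [hpre])]
        simp only [List.getElem_drop]
        congr 1
        rw [hpre]; omega
      rw [hB M k (by omega), hMk, hM, List.drop_eq_getElem_cons hklt]
      rw [List.set_append_right _ _ (by omega), hpre, Nat.sub_self, List.set_cons_zero]
      rw [List.take_succ_eq_append_getElem hklt, List.map_append]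
      simp
  rw [aux g.length le_rfl]
  simp

theorem pvSet2_length (g : List (List Int)) (r c : Nat) (v : Int) :
    (pvSet2 g r c v).length = g.length := by simp [pvSet2]

theorem pvSet2_row_ne (g : List (List Int)) (r c : Nat) (v : Int) (r' : Nat) (h : r ≠ r') :
    (pvSet2 g r c v).getD r' [] = g.getD r' [] := pvGridGetD_set_ne _ _ _ _ h

theorem pvSet2_row_self (g : List (List Int)) (r c : Nat) (v : Int) (h : r < g.length) :
    (pvSet2 g r c v).getD r [] = (g.getD r []).set c v := pvGridGetD_set_self _ _ _ h

theorem innerT_inv (g : List (List Int)) (col : Nat)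
    (hcol : ∀ r, r < g.length → col < (g.getD r []).length) :
    ∀ m, m + 1 ≤ g.length →
      ((List.range' 1 m).foldl (pvStepT col) g).length = g.length ∧
      (∀ r, (((List.range' 1 m).foldl (pvStepT col) g).getD r []).length = (g.getD r []).length) ∧
      (∀ r c', ¬(r ≤ m ∧ c' = col) →
        (((List.range' 1 m).foldl (pvStepT col) g).getD r []).getD c' 0 = (g.getD r []).getD c' 0) ∧
      (∀ r, r ≤ m →
        (((List.range' 1 m).foldl (pvStepT col) g).getD r []).getD col 0 = pmax (colOf g col) r) := by
  intro m
  induction m with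
  | zero =>
    intro h
    refine ⟨rfl, fun _ => rfl, fun _ _ _ => rfl, ?_⟩
    intro r hr
    interval_cases r
    simp only [List.range'_zero, List.foldl_nil]
    rw [pmax_zero _ (by simp [colOf]; omega), colOf_getD _ _ _ (by omega)]
  | succ m ih =>
    intro h
    obtain ⟨ihl, ihrow, ihu, ihp⟩ := ih (by omega)
    rw [List.range'_1_concat, List.foldl_append, List.foldl_cons, List.foldl_nil]
    set T := (List.range' 1 m).foldl (pvStepT col) g with hT
    have hTrow : (T.getD (1 + m) []).length = (g.getD (1 + m) []).length := ihrow (1 + m)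
    have hv : pvGet2 T (1 + m) col = (g.getD (1 + m) []).getD col 0 := by
      rw [pvGet2, ihu (1 + m) col (by omega)]
    have hv' : pvGet2 T (1 + m - 1) col = pmax (colOf g col) m := by
      rw [pvGet2, show 1 + m - 1 = m by omega, ihp m le_rfl]
    constructor
    · rw [pvStepT, pvSet2_length, ihl]
    refine ⟨?_, ?_, ?_⟩
    · intro r
      by_cases hr : (1 + m) = r
      · subst hr
        rw [pvStepT, pvSet2_row_self _ _ _ _ (by omega), List.length_set]
        exact hTrow
      · rw [pvStepT, pvSet2_row_ne _ _ _ _ _ hr, ihrow]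
    · intro r c' hnot
      by_cases hr : (1 + m) = r
      · subst hr
        have hc' : c' ≠ col := by omega
        rw [pvStepT, pvSet2_row_self _ _ _ _ (by omega), pvGetD_set_ne _ _ _ _ (Ne.symm hc'),
          ihu _ _ (by omega)]
      · rw [pvStepT, pvSet2_row_ne _ _ _ _ _ hr, ihu _ _ (by omega)]
    · intro r hrm
      by_cases hr : (1 + m) = r
      · subst hr
        rw [pvStepT, pvSet2_row_self _ _ _ _ (by omega),
          pvGetD_set_self _ _ _ (by rw [hTrow]; exact hcol _ (by omega)), hv, hv']
        rw [show (1:Nat) + m = m + 1 by omega, pmax_succ _ m (by simp [colOf]; omega),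
          colOf_getD _ _ _ (by omega), max_comm, show m + 1 = 1 + m by omega]
      · rw [pvStepT, pvSet2_row_ne _ _ _ _ _ hr, ihp _ (by omega)]

theorem colOf_set (g : List (List Int)) (col m : Nat) (hm : m < g.length)
    (hcol : col < (g.getD m []).length) (v : Int) :
    colOf (g.set m ((g.getD m []).set col v)) col = (colOf g col).set m v := by
  apply List.ext_getElem (by simp [colOf])
  intro i h1 h2
  have hig : i < g.length := by simpa [colOf] using h2
  rw [← pvGetD_eq_getElem _ _ h1, ← pvGetD_eq_getElem _ _ h2,
    colOf_getD _ _ _ (by simpa using hig)]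
  by_cases hi : m = i
  · subst hi
    rw [pvGridGetD_set_self _ _ _ hm, pvGetD_set_self _ _ _ hcol,
      pvGetD_set_self _ _ _ (by simpa [colOf] using hm)]
  · rw [pvGridGetD_set_ne _ _ _ _ hi, pvGetD_set_ne _ _ _ _ hi, colOf_getD _ _ _ hig]

theorem innerB_inv (col : Nat) :
    ∀ (m : Nat) (g : List (List Int)), m + 1 ≤ g.length →
      (∀ r, r < g.length → col < (g.getD r []).length) →
      (((List.range m).reverse).foldl (pvStepB col) g).length = g.length ∧
      (∀ r, ((((List.range m).reverse).foldl (pvStepB col) g).getD r []).length = (g.getD r []).length) ∧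
      (∀ r c', ¬(r ≤ m ∧ c' = col) →
        ((((List.range m).reverse).foldl (pvStepB col) g).getD r []).getD c' 0 = (g.getD r []).getD c' 0) ∧
      (∀ r, r ≤ m →
        ((((List.range m).reverse).foldl (pvStepB col) g).getD r []).getD col 0 =
          pmax ((colOf g col).drop r) (m - r)) := by
  intro m
  induction m with
  | zero =>
    intro g h hcol
    refine ⟨rfl, fun _ => rfl, fun _ _ _ => rfl, ?_⟩
    intro r hr
    interval_cases r
    simp only [List.range_zero, List.reverse_nil, List.foldl_nil]
    rw [List.drop_zero, Nat.sub_zero, pmax_zero _ (by simp [colOf]; omega),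
      colOf_getD _ _ _ (by omega)]
  | succ m ih =>
    intro g h hcol
    rw [List.range_succ, List.reverse_append]
    simp only [List.reverse_cons, List.reverse_nil, List.nil_append, List.cons_append,
      List.foldl_cons]
    have hrowm : col < (g.getD m []).length := hcol m (by omega)
    set v := max (pvGet2 g m col) (pvGet2 g (m + 1) col) with hvdef
    set g' := pvStepB col g m with hg'
    have hg'len : g'.length = g.length := by rw [hg', pvStepB, pvSet2_length]
    have hg'row : ∀ r, (g'.getD r []).length = (g.getD r []).length := by
      intro r
      by_cases hr : m = r
      · subst hr
        rw [hg', pvStepB, pvSet2_row_self _ _ _ _ (by omega), List.length_set]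
      · rw [hg', pvStepB, pvSet2_row_ne _ _ _ _ _ hr]
    have hg'entry_ne : ∀ r c', ¬(r = m ∧ c' = col) → (g'.getD r []).getD c' 0 = (g.getD r []).getD c' 0 := by
      intro r c' hnot
      by_cases hr : m = r
      · subst hr
        rw [hg', pvStepB, pvSet2_row_self _ _ _ _ (by omega),
          pvGetD_set_ne _ _ _ _ (fun hc => hnot ⟨rfl, hc.symm⟩)]
      · rw [hg', pvStepB, pvSet2_row_ne _ _ _ _ _ hr]
    obtain ⟨ihl, ihrow, ihu, ihp⟩ := ih g' (by omega) (by intro r hr; rw [hg'row]; exact hcol r (by omega))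
    have hcolset : colOf g' col = (colOf g col).set m (max ((colOf g col).getD m 0) ((colOf g col).getD (m+1) 0)) := by
      rw [hg', pvStepB, pvSet2]
      rw [colOf_set g col m (by omega) hrowm]
      congr 1
      simp only [pvGet2]
      rw [colOf_getD _ _ _ (by omega), colOf_getD _ _ _ (by omega)]
    refine ⟨by omega, by intro r; rw [ihrow, hg'row], ?_, ?_⟩
    · intro r c' hnot
      rw [ihu r c' (by omega), hg'entry_ne r c' (by omega)]
    · intro r hrm
      by_cases hle : r ≤ m
      · rw [ihp r hle, hcolset]
        exact pmax_set_drop (colOf g col) m r hle (by simp [colOf]; omega)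
      · have hreq : r = m + 1 := by omega
        subst hreq
        rw [ihu _ _ (by omega), hg'entry_ne _ _ (by omega), Nat.sub_self,
          pmax_zero _ (by simp [colOf]; omega), pvGetD_drop, Nat.add_zero,
          colOf_getD _ _ _ (by omega)]

theorem outerT_inv (g : List (List Int)) (ncols : Nat)
    (hrect : ∀ r, r < g.length → (g.getD r []).length = ncols) (hcn : g.length ≤ ncols) :
    ∀ k, k ≤ g.length →
      ((List.range k).foldl (fun gg col => (List.range' 1 (g.length - 1)).foldl (pvStepT col) gg) g).length = g.length ∧
      (∀ r, (((List.range k).foldl (fun gg col => (List.range' 1 (g.length - 1)).foldl (pvStepT col) gg) g).getD r []).length = (g.getD r []).length) ∧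
      (∀ r c', k ≤ c' → (((List.range k).foldl (fun gg col => (List.range' 1 (g.length - 1)).foldl (pvStepT col) gg) g).getD r []).getD c' 0 = (g.getD r []).getD c' 0) ∧
      (∀ r c', r < g.length → c' < k → (((List.range k).foldl (fun gg col => (List.range' 1 (g.length - 1)).foldl (pvStepT col) gg) g).getD r []).getD c' 0 = pmax (colOf g c') r) := by
  intro k
  induction k with
  | zero => intro _; exact ⟨rfl, fun _ => rfl, fun _ _ _ => rfl, fun _ _ _ h => absurd h (by omega)⟩
  | succ k ih =>
    intro hk
    obtain ⟨ihl, ihrow, ihu, ihp⟩ := ih (by omega)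
    rw [List.range_succ, List.foldl_append, List.foldl_cons, List.foldl_nil]
    set G := (List.range k).foldl (fun gg col => (List.range' 1 (g.length - 1)).foldl (pvStepT col) gg) g with hG
    have hcolG : ∀ r, r < G.length → k < (G.getD r []).length := by
      intro r hr
      rw [ihrow, hrect r (by omega)]; omega
    obtain ⟨il, irow, iu, ip⟩ := innerT_inv G k hcolG (g.length - 1) (by omega)
    have hcolsame : colOf G k = colOf g k := by
      apply List.ext_getElem (by simp [colOf]; omega)
      intro i h1 h2
      have hig : i < g.length := by simpa [colOf] using h2
      rw [← pvGetD_eq_getElem _ _ h1, ← pvGetD_eq_getElem _ _ h2,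
        colOf_getD _ _ _ (by omega), colOf_getD _ _ _ hig, ihu i k le_rfl]
    refine ⟨by omega, by intro r; rw [irow, ihrow], ?_, ?_⟩
    · intro r c' hc'
      rw [iu r c' (by omega), ihu r c' (by omega)]
    · intro r c' hr hc'
      by_cases hce : c' = k
      · subst hce
        rw [ip r (by omega), hcolsame]
      · rw [iu r c' (by omega), ihp r c' hr (by omega)]

theorem outerB_inv (g : List (List Int)) (ncols : Nat)
    (hrect : ∀ r, r < g.length → (g.getD r []).length = ncols) (hcn : g.length ≤ ncols) :
    ∀ k, k ≤ g.length →
      ((List.range k).foldl (fun gg col => ((List.range (g.length - 1)).reverse).foldl (pvStepB col) gg) g).length = g.length ∧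
      (∀ r, (((List.range k).foldl (fun gg col => ((List.range (g.length - 1)).reverse).foldl (pvStepB col) gg) g).getD r []).length = (g.getD r []).length) ∧
      (∀ r c', k ≤ c' → (((List.range k).foldl (fun gg col => ((List.range (g.length - 1)).reverse).foldl (pvStepB col) gg) g).getD r []).getD c' 0 = (g.getD r []).getD c' 0) ∧
      (∀ r c', r < g.length → c' < k → (((List.range k).foldl (fun gg col => ((List.range (g.length - 1)).reverse).foldl (pvStepB col) gg) g).getD r []).getD c' 0 = pmax ((colOf g c').drop r) (g.length - 1 - r)) := by
  intro k
  induction k with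
  | zero => intro _; exact ⟨rfl, fun _ => rfl, fun _ _ _ => rfl, fun _ _ _ h => absurd h (by omega)⟩
  | succ k ih =>
    intro hk
    obtain ⟨ihl, ihrow, ihu, ihp⟩ := ih (by omega)
    rw [List.range_succ, List.foldl_append, List.foldl_cons, List.foldl_nil]
    set G := (List.range k).foldl (fun gg col => ((List.range (g.length - 1)).reverse).foldl (pvStepB col) gg) g with hG
    obtain ⟨il, irow, iu, ip⟩ := innerB_inv k (g.length - 1) G (by omega)
      (by intro r hr; rw [ihrow, hrect r (by omega)]; omega)
    have hcolsame : colOf G k = colOf g k := by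
      apply List.ext_getElem (by simp [colOf]; omega)
      intro i h1 h2
      have hig : i < g.length := by simpa [colOf] using h2
      rw [← pvGetD_eq_getElem _ _ h1, ← pvGetD_eq_getElem _ _ h2,
        colOf_getD _ _ _ (by omega), colOf_getD _ _ _ hig, ihu i k le_rfl]
    refine ⟨by omega, by intro r; rw [irow, ihrow], ?_, ?_⟩
    · intro r c' hc'
      rw [iu r c' (by omega), ihu r c' (by omega)]
    · intro r c' hr hc'
      by_cases hce : c' = k
      · subst hce
        rw [ip r (by omega), hcolsame]
      · rw [iu r c' (by omega), ihp r c' hr (by omega)]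

theorem rect_idx (g : List (List Int)) (c : Nat) (hrect : ∀ row ∈ g, row.length = c) :
    ∀ r, r < g.length → (g.getD r []).length = c := by
  intro r hr
  rw [List.getD_eq_getElem g [] hr]
  exact hrect _ (List.getElem_mem hr)

-- row-level specs of A's horizontal passes

theorem leftRow_spec (xs : List Int) :
    (List.range' 1 (xs.length - 1)).foldl pvStepL xs
      = (List.range xs.length).map (fun c => pvMax (xs.take (c + 1))) := by
  rcases Nat.eq_zero_or_pos xs.length with hz | hpos
  · rw [List.length_eq_zero_iff.mp hz]; rfl
  · obtain ⟨hl, he⟩ := leftRow_inv xs (xs.length - 1) (by omega)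
    apply List.ext_getElem (by simp [hl])
    intro i h1 h2
    have hi : i < xs.length := by omega
    rw [← pvGetD_eq_getElem _ _ h1, he i hi, if_pos (by omega)]
    simp only [List.getElem_map, List.getElem_range]
    rw [pvMax_take xs i hi]

theorem rightRow_spec (xs : List Int) :
    ((List.range (xs.length - 1)).reverse).foldl pvStepR xs
      = (List.range xs.length).map (fun c => pvMax (xs.drop c)) := by
  rcases Nat.eq_zero_or_pos xs.length with hz | hpos
  · rw [List.length_eq_zero_iff.mp hz]; rfl
  · obtain ⟨hl, he⟩ := rightRow_inv (xs.length - 1) xs (by omega)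
    apply List.ext_getElem (by rw [hl, List.length_map, List.length_range])
    intro i h1 h2
    have hi : i < xs.length := by omega
    rw [← pvGetD_eq_getElem _ _ h1, he i hi, if_pos (by omega)]
    simp only [List.getElem_map, List.getElem_range]
    rw [pvMax_drop xs i hi]

theorem leftA_spec (g : List (List Int)) (ncols : Nat) (hrect : ∀ row ∈ g, row.length = ncols) :
    (List.range g.length).foldl (fun gg row => (List.range' 1 (ncols - 1)).foldl
      (fun h col => pvSet2 h row col (max (pvGet2 h row col) (pvGet2 h row (col - 1)))) gg) g
      = g.map (fun row => (List.range row.length).map (fun c => pvMax (row.take (c + 1)))) := by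
  have h1 : ∀ (gg : List (List Int)) (r : Nat), r < gg.length →
      (List.range' 1 (ncols - 1)).foldl
        (fun h col => pvSet2 h r col (max (pvGet2 h r col) (pvGet2 h r (col - 1)))) gg
        = gg.set r ((List.range' 1 (ncols - 1)).foldl pvStepL (gg.getD r [])) := by
    intro gg r hr
    exact fold_row_local _ gg r pvStepL hr
  rw [foldl_rows_map _ (fun ys => (List.range' 1 (ncols - 1)).foldl pvStepL ys) h1 g]
  apply List.map_congr_left
  intro row hrow
  rw [← hrect row hrow]
  exact leftRow_spec row

theorem rightA_spec (g : List (List Int)) (ncols : Nat) (hrect : ∀ row ∈ g, row.length = ncols) :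
    (List.range g.length).foldl (fun gg row => ((List.range (ncols - 1)).reverse).foldl
      (fun h col => pvSet2 h row col (max (pvGet2 h row col) (pvGet2 h row (col + 1)))) gg) g
      = g.map (fun row => (List.range row.length).map (fun c => pvMax (row.drop c))) := by
  have h1 : ∀ (gg : List (List Int)) (r : Nat), r < gg.length →
      ((List.range (ncols - 1)).reverse).foldl
        (fun h col => pvSet2 h r col (max (pvGet2 h r col) (pvGet2 h r (col + 1)))) gg
        = gg.set r (((List.range (ncols - 1)).reverse).foldl pvStepR (gg.getD r [])) := by
    intro gg r hr
    exact fold_row_local _ gg r pvStepR hr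
  rw [foldl_rows_map _ (fun ys => ((List.range (ncols - 1)).reverse).foldl pvStepR ys) h1 g]
  apply List.map_congr_left
  intro row hrow
  rw [← hrect row hrow]
  exact rightRow_spec row

-- B's vertical entries are column prefix/suffix maxima

theorem colOf_take (g : List (List Int)) (c r : Nat) :
    (g.take r).map (fun x => x.getD c 0) = (colOf g c).take r := by
  simp [colOf, List.map_take]

theorem colOf_drop (g : List (List Int)) (c r : Nat) :
    (g.drop r).map (fun x => x.getD c 0) = (colOf g c).drop r := by
  simp [colOf, List.map_drop]

theorem B_top_entry (g : List (List Int)) (r c : Nat) (hr : r < g.length) :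
    pvMax ((g.take (r + 1)).map (fun x => x.getD c 0)) = pmax (colOf g c) r := by
  rw [colOf_take, pvMax_take _ _ (by simp [colOf]; omega)]

theorem B_bottom_entry (g : List (List Int)) (r c : Nat) (hr : r < g.length) :
    pvMax ((g.drop r).map (fun x => x.getD c 0)) = pmax ((colOf g c).drop r) (g.length - 1 - r) := by
  rw [colOf_drop, pvMax_drop _ _ (by simp [colOf]; omega)]
  simp [colOf]

-- constant columns beyond the row count (¬D_) have trivial prefix/suffix maxima

theorem pmax_colOf_const (g : List (List Int)) (c r : Nat) (hr : r < g.length)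
    (hconst : ∀ r1 < g.length, ∀ r2 < g.length, (g.getD r1 []).getD c 0 = (g.getD r2 []).getD c 0) :
    pmax (colOf g c) r = (g.getD r []).getD c 0 := by
  apply pmax_const _ _ _ (by simp [colOf]; omega)
  intro i hi
  have hig : i < g.length := by simpa [colOf] using hi
  rw [colOf_getD _ _ _ hig]
  exact hconst i hig r hr

theorem pmax_colOf_drop_const (g : List (List Int)) (c r : Nat) (hr : r < g.length)
    (hconst : ∀ r1 < g.length, ∀ r2 < g.length, (g.getD r1 []).getD c 0 = (g.getD r2 []).getD c 0) :
    pmax ((colOf g c).drop r) (g.length - 1 - r) = (g.getD r []).getD c 0 := by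
  apply pmax_const _ _ _ (by simp [colOf]; omega)
  intro i hi
  have hig : r + i < g.length := by simp [colOf] at hi; omega
  rw [pvGetD_drop, colOf_getD _ _ _ hig]
  exact hconst (r + i) hig r hr

theorem grid_ext (X Y : List (List Int)) (hlen : X.length = Y.length)
    (hrow : ∀ r < X.length, (X.getD r []).length = (Y.getD r []).length)
    (hent : ∀ r < X.length, ∀ c < (X.getD r []).length, (X.getD r []).getD c 0 = (Y.getD r []).getD c 0) :
    X = Y := by
  apply List.ext_getElem hlen
  intro r h1 h2
  rw [← List.getD_eq_getElem X [] h1, ← List.getD_eq_getElem Y [] h2]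
  apply List.ext_getElem (hrow r h1)
  intro c hc1 hc2
  rw [← pvGetD_eq_getElem _ _ hc1, ← pvGetD_eq_getElem _ _ hc2]
  exact hent r h1 c hc1

theorem topA_spec (g : List (List Int)) (ncols : Nat)
    (hrect : ∀ row ∈ g, row.length = ncols) (hcn : g.length ≤ ncols)
    (hconst : ∀ c, g.length ≤ c → c < ncols →
      ∀ r1 < g.length, ∀ r2 < g.length, (g.getD r1 []).getD c 0 = (g.getD r2 []).getD c 0) :
    (List.range g.length).foldl (fun gg col => (List.range' 1 (g.length - 1)).foldl (pvStepT col) gg) g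
      = (List.range g.length).map (fun r =>
          (List.range (g.getD r []).length).map (fun c =>
            pvMax ((g.take (r + 1)).map (fun x => x.getD c 0)))) := by
  have hidx := rect_idx g ncols hrect
  obtain ⟨ol, orow, ou, op⟩ := outerT_inv g ncols hidx hcn g.length le_rfl
  apply grid_ext _ _ (by rw [ol]; simp)
  · intro r hr'
    have hr : r < g.length := by omega
    rw [orow, pvGetD_map_range _ _ _ _ (by exact hr)]
    simp
  · intro r hr' c hc'
    have hr : r < g.length := by omega
    have hc : c < ncols := by rw [orow, hidx r hr] at hc'; exact hc'
    rw [pvGetD_map_range _ _ _ _ (by exact hr),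
      pvGetD_map_range _ _ _ _ (by rw [hidx r hr]; exact hc), B_top_entry g r c hr]
    by_cases hck : c < g.length
    · exact op r c hr hck
    · rw [ou r c (by omega), pmax_colOf_const g c r hr (hconst c (by omega) hc)]

theorem bottomA_spec (g : List (List Int)) (ncols : Nat)
    (hrect : ∀ row ∈ g, row.length = ncols) (hcn : g.length ≤ ncols)
    (hconst : ∀ c, g.length ≤ c → c < ncols →
      ∀ r1 < g.length, ∀ r2 < g.length, (g.getD r1 []).getD c 0 = (g.getD r2 []).getD c 0) :
    (List.range g.length).foldl (fun gg col => ((List.range (g.length - 1)).reverse).foldl (pvStepB col) gg) g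
      = (List.range g.length).map (fun r =>
          (List.range (g.getD r []).length).map (fun c =>
            pvMax ((g.drop r).map (fun x => x.getD c 0)))) := by
  have hidx := rect_idx g ncols hrect
  obtain ⟨ol, orow, ou, op⟩ := outerB_inv g ncols hidx hcn g.length le_rfl
  apply grid_ext _ _ (by rw [ol]; simp)
  · intro r hr'
    have hr : r < g.length := by omega
    rw [orow, pvGetD_map_range _ _ _ _ (by exact hr)]
    simp
  · intro r hr' c hc'
    have hr : r < g.length := by omega
    have hc : c < ncols := by rw [orow, hidx r hr] at hc'; exact hc'
    rw [pvGetD_map_range _ _ _ _ (by exact hr),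
      pvGetD_map_range _ _ _ _ (by rw [hidx r hr]; exact hc), B_bottom_entry g r c hr]
    by_cases hck : c < g.length
    · exact op r c hr hck
    · rw [ou r c (by omega), pmax_colOf_drop_const g c r hr (hconst c (by omega) hc)]

theorem main_equiv (grid : List (List Int))
    (hrect : ∀ row ∈ grid, row.length = (grid.headD []).length)
    (hcase : grid.length ≤ (grid.headD []).length ∨ grid.length = 1)
    (hconst : ∀ c, grid.length ≤ c → c < (grid.headD []).length →
      ∀ r1 < grid.length, ∀ r2 < grid.length,
        (grid.getD r1 []).getD c 0 = (grid.getD r2 []).getD c 0) :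
    calculate_maxes grid = calculate_maxes_alt grid := by
  by_cases hwide : grid.length ≤ (grid.headD []).length
  · simp only [calculate_maxes, calculate_maxes_alt, Prod.mk.injEq]
    exact ⟨leftA_spec grid _ hrect, rightA_spec grid _ hrect,
      topA_spec grid _ hrect hwide hconst, bottomA_spec grid _ hrect hwide hconst⟩
  · -- grid.length = 1 (and its single row is shorter than 1 entry): grid = [[]]
    have h1 : grid.length = 1 := by
      rcases hcase with h | h
      · exact absurd h hwide
      · exact h
    obtain ⟨row, rfl⟩ : ∃ row, grid = [row] := by
      match grid, h1 with
      | [row], _ => exact ⟨row, rfl⟩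
    have hz : row.length = 0 := by
      simp only [List.headD_cons, List.length_cons, List.length_nil, Nat.zero_add,
        not_le] at hwide
      omega
    rw [List.length_eq_zero_iff.mp hz]
    decide

-- a disagreeing entry inside D_ forces the outputs apart
theorem differ_aux (g : List (List Int)) (ncols : Nat)
    (hrect : ∀ row ∈ g, row.length = ncols) (hcn : g.length ≤ ncols)
    (c r1 r2 : Nat) (hge : g.length ≤ c) (hc : c < ncols)
    (hr1 : r1 < g.length) (hr2 : r2 < g.length)
    (hval : (g.getD r1 []).getD c 0 < (g.getD r2 []).getD c 0) :
    calculate_maxes g ≠ calculate_maxes_alt g := by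
  intro heq
  have hidx := rect_idx g ncols hrect
  have hcol : (colOf g c).length = g.length := by simp [colOf]
  rcases lt_trichotomy r1 r2 with hlt | hE | hgt
  · -- a bigger entry BELOW r1: the bottom grids disagree at (r1, c)
    obtain ⟨ol, orow, ou, op⟩ := outerB_inv g ncols hidx hcn g.length le_rfl
    have h1 := congrArg (fun t => ((t.2.2.2).getD r1 []).getD c 0) heq
    simp only [calculate_maxes, calculate_maxes_alt] at h1
    rw [ou r1 c (by omega),
      pvGetD_map_range _ _ _ _ (by exact hr1),
      pvGetD_map_range _ _ _ _ (by rw [hidx r1 hr1]; exact hc),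
      B_bottom_entry g r1 c hr1] at h1
    have hmem : ((colOf g c).drop r1).getD (r2 - r1) 0 ∈
        ((colOf g c).drop r1).take (g.length - 1 - r1 + 1) :=
      pvGetD_mem_take _ _ _ (by omega) (by simp [colOf]; omega)
    have hb := (pmax_is_max ((colOf g c).drop r1) (g.length - 1 - r1)
      (by simp [colOf]; omega)).2 _ hmem
    rw [pvGetD_drop, show r1 + (r2 - r1) = r2 by omega, colOf_getD _ _ _ hr2] at hb
    exact lt_irrefl _ (lt_of_le_of_lt (hb.trans h1.symm.le) hval)
  · subst hE
    exact lt_irrefl _ hval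
  · -- a bigger entry ABOVE r1: the top grids disagree at (r1, c)
    obtain ⟨ol, orow, ou, op⟩ := outerT_inv g ncols hidx hcn g.length le_rfl
    have h1 := congrArg (fun t => ((t.2.2.1).getD r1 []).getD c 0) heq
    simp only [calculate_maxes, calculate_maxes_alt] at h1
    rw [ou r1 c (by omega),
      pvGetD_map_range _ _ _ _ (by exact hr1),
      pvGetD_map_range _ _ _ _ (by rw [hidx r1 hr1]; exact hc),
      B_top_entry g r1 c hr1] at h1
    have hmem : (colOf g c).getD r2 0 ∈ (colOf g c).take (r1 + 1) :=
      pvGetD_mem_take _ _ _ (by omega) (by omega)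
    have hb := (pmax_is_max (colOf g c) r1 (by omega)).2 _ hmem
    rw [colOf_getD _ _ _ hr2] at hb
    exact lt_irrefl _ (lt_of_le_of_lt (hb.trans h1.symm.le) hval)

-- ===== VERDICT (by name: the statements are the Claim_ definitions above) =====
theorem calculate_maxes_spec : Claim_unchanged_calculate_maxes := by
  intro grid _ hpre hnd
  apply main_equiv grid hpre.1 hpre.2
  intro c hge hlt r1 hr1 r2 hr2
  by_contra hne
  exact hnd ⟨c, hlt, hge, r1, hr1, r2, hr2, hne⟩

theorem calculate_maxes_changed : Claim_changed_calculate_maxes := by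
  unfold Claim_changed_calculate_maxes
  refine ⟨by decide, by decide, by decide, by decide, by decide, by decide⟩

theorem calculate_maxes_tight : Claim_exact_calculate_maxes := by
  intro grid _ hpre hd
  obtain ⟨c, hlt, hge, r1, hr1, r2, hr2, hne⟩ := hd
  have hwide : grid.length ≤ (grid.headD []).length := by
    rcases hpre.2 with h | h
    · exact h
    · exfalso
      have : r1 = r2 := by omega
      exact hne (this ▸ rfl)
  rcases lt_trichotomy ((grid.getD r1 []).getD c 0) ((grid.getD r2 []).getD c 0) with hv | hv | hv
  · exact differ_aux grid _ hpre.1 hwide c r1 r2 hge hlt hr1 hr2 hv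
  · exact absurd hv hne
  · exact differ_aux grid _ hpre.1 hwide c r2 r1 hge hlt hr2 hr1 hv
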